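-- pv_equiv track=rewrite | github.com/cegranger/mltosis | src/mltosis/keras3.py | _partition_1d
-- ===== SOURCE A (Python) =====
-- def _partition_1d(n: int, parts: int) -> list[tuple[int, int]]:
--     if parts <= 0:
--         raise ValueError("parts must be >= 1")
--     if n <= 0:
--         raise ValueError("n must be >= 1")
--     if parts > n:
--         raise ValueError(f"Cannot partition length {n} into {parts} non-empty parts")
--
--     base = n // parts
--     rem = n % parts
--     ranges = []
--     start = 0
--     for i in range(parts):
--         size = base + (1 if i < rem else 0)
--         end = start + size
--         ranges.append((start, end))
--         start = end
--     return ranges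
-- ===== SOURCE B (Python) =====
-- def _partition_1d(n: int, parts: int) -> list[tuple[int, int]]:
--     if parts <= 0:
--         raise ValueError("parts must be >= 1")
--     if n <= 0:
--         raise ValueError("n must be >= 1")
--     if parts > n:
--         raise ValueError(f"Cannot partition length {n} into {parts} non-empty parts")
--
--     base = n // parts
--     rem = n % parts
--     return [(i * base + min(i, rem), (i + 1) * base + min(i + 1, rem))
--             for i in range(parts)]
-- ===== Notes on version B (the rewrite author's own statement) =====
-- stated objective: alternative
-- what changed: Replaced A's sequential loop with a running start accumulator by a stateless comprehension computing each range in closed form from its index (start = i*base + min(i, rem)).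
import Mathlib
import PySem

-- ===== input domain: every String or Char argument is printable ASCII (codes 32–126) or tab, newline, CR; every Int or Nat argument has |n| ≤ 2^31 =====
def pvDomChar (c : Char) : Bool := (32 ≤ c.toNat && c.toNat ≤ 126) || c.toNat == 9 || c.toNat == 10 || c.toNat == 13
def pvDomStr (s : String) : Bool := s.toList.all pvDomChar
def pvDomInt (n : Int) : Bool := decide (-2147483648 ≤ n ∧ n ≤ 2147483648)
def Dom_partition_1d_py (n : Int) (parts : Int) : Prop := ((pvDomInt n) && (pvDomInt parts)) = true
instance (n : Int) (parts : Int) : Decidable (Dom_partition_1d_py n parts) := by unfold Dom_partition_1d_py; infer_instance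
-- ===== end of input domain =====

-- B replaces A's running-start accumulator loop by a stateless closed-form map over the
-- indices (alternative decomposition, same cost); equivalence is proved on Pre_ (where A returns).

-- ===== PORT A =====
-- A raises ValueError on the three guard cases; those inputs are excluded by Pre_ below,
-- the port returns [] there (value irrelevant outside Pre_).
def partition_1d_py (n : Int) (parts : Int) : List (Int × Int) :=
  if parts ≤ 0 then []
  else if n ≤ 0 then []
  else if parts > n then []
  else
    let base := PySem.Int.floordiv n parts
    let rem := PySem.Int.mod n parts
    let res := (PySem.List.pyRange 0 parts 1).foldl
      (fun (st : List (Int × Int) × Int) i =>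
        let size := base + (if i < rem then 1 else 0)
        let e := st.2 + size
        (st.1 ++ [(st.2, e)], e)) ([], 0)
    res.1

-- ===== PORT B =====
def partition_1d_py_alt (n : Int) (parts : Int) : List (Int × Int) :=
  if parts ≤ 0 then []
  else if n ≤ 0 then []
  else if parts > n then []
  else
    let base := PySem.Int.floordiv n parts
    let rem := PySem.Int.mod n parts
    (PySem.List.pyRange 0 parts 1).map
      (fun i => (i * base + min i rem, (i + 1) * base + min (i + 1) rem))

-- ===== PRECONDITION & SPEC =====
-- Pre_ excludes exactly the inputs where A raises ValueError (its three guards).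
def Pre_partition_1d_py (n : Int) (parts : Int) : Prop := 0 < parts ∧ 0 < n ∧ parts ≤ n
instance (n : Int) (parts : Int) : Decidable (Pre_partition_1d_py n parts) := by
  unfold Pre_partition_1d_py; infer_instance
def pvWitness_partition_1d_py : Int × Int := (7, 3)

def Spec_partition_1d_py (n : Int) (parts : Int) (out : List (Int × Int)) : Prop := out = partition_1d_py_alt n parts
instance (n : Int) (parts : Int) (out : List (Int × Int)) : Decidable (Spec_partition_1d_py n parts out) := by unfold Spec_partition_1d_py; infer_instance

-- ===== CLAIM (what is proved, stated in full; the proofs are below) =====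
def Claim_equal_partition_1d_py : Prop := ∀ (n : Int) (parts : Int), Dom_partition_1d_py n parts → Pre_partition_1d_py n parts → Spec_partition_1d_py n parts (partition_1d_py n parts)

-- ===== LEMMAS AND PROOFS =====

-- closed-form cumulative offset after k iterations of A's loop
def pvOff (base rem : Int) (k : Nat) : Int := (k : Int) * base + min (k : Int) rem

theorem pvOff_succ (base rem : Int) (k : Nat) :
    pvOff base rem (k + 1) = pvOff base rem k + (base + (if (k : Int) < rem then 1 else 0)) := by
  unfold pvOff
  push_cast
  have hb : ((k : Int) + 1) * base = (k : Int) * base + base := by ring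
  rw [hb]
  omega

-- invariant of A's foldl over an index prefix
theorem pvLoopA (base rem : Int) (hr : 0 ≤ rem) (m : Nat) (L : List (Int × Int)) (s : Int) :
    ((List.range m).foldl
      (fun (st : List (Int × Int) × Int) (k : Nat) =>
        let size := base + (if (k : Int) < rem then 1 else 0)
        let e := st.2 + size
        (st.1 ++ [(st.2, e)], e)) (L, s))
    = (L ++ (List.range m).map (fun k => (s + pvOff base rem k, s + pvOff base rem (k + 1))),
       s + pvOff base rem m) := by
  induction m with
  | zero => simp [pvOff]; omega
  | succ m ih =>
      rw [List.range_succ, List.foldl_append, ih]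
      simp only [List.foldl_cons, List.foldl_nil, List.map_append, List.map_cons, List.map_nil,
        List.append_assoc]
      rw [pvOff_succ]
      simp [add_assoc]

theorem partition_1d_py_spec : Claim_equal_partition_1d_py := by
  intro n parts _ hpre
  obtain ⟨hp, hn, hpn⟩ := hpre
  unfold Spec_partition_1d_py partition_1d_py partition_1d_py_alt
  rw [if_neg (by omega), if_neg (by omega), if_neg (by omega),
      if_neg (by omega), if_neg (by omega), if_neg (by omega)]
  set base := PySem.Int.floordiv n parts with hbase
  set rem := PySem.Int.mod n parts with hrem
  rw [PySem.List.pyRange_one]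
  simp only [Int.sub_zero, List.foldl_map, List.map_map, Int.zero_add]
  have hr : 0 ≤ rem := by rw [hrem]; exact PySem.Int.mod_nonneg _ hp
  rw [pvLoopA base rem hr parts.toNat [] 0]
  simp only [List.nil_append]
  apply List.map_congr_left
  intro k _
  unfold pvOff
  simp only [Function.comp_apply]
  push_cast
  simp
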